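-- pv_equiv track=rewrite | github.com/jbenon/Mini-Python-shell | app/commands.py | parseInputIntoCommand
-- ===== SOURCE A (Python) =====
-- def parseInputIntoCommand(inputString: str = "") -> list[str]:
--     """Parses the input string to extract the command and its arguments.
--
--     Arguments are separated by white spaces. Anything within single quotes,
--     including spaces and backlashes, is interpreted literally. Anything within
--     double quotes is interpreted literally, except for backlashes which escape
--     some characters. Outside quotes, backlashes escape any character."""
--     listArgs = []
--     currentArg = ""
--     isBetweenSingleQuotes = False
--     isBetweenDoubleQuotes = False
--     escapeNextChar = False
--     for iChar, char in enumerate(inputString):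
--         if escapeNextChar:
--             if isBetweenDoubleQuotes:
--                 if char in ['"', "\\", "$", "`"]:
--                     currentArg = currentArg + char
--                 else:
--                     currentArg = currentArg + "\\" + char
--             else:
--                 currentArg = currentArg + char
--             escapeNextChar = False
--         else:
--             match char:
--                 case "\\":
--                     if isBetweenSingleQuotes:
--                         currentArg = currentArg + char
--                     else:
--                         escapeNextChar = True
--                 case "'":
--                     currentArg, isBetweenSingleQuotes = interpretArgQuote(
--                         char,
--                         isBetweenSingleQuotes,
--                         isBetweenDoubleQuotes,
--                         currentArg,
--                         iChar,
--                         inputString,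
--                     )
--                 case '"':
--                     currentArg, isBetweenDoubleQuotes = interpretArgQuote(
--                         char,
--                         isBetweenDoubleQuotes,
--                         isBetweenSingleQuotes,
--                         currentArg,
--                         iChar,
--                         inputString,
--                     )
--                 case " ":
--                     if isBetweenSingleQuotes or isBetweenDoubleQuotes:
--                         currentArg = currentArg + char
--                     else:
--                         # Start new block delimited by a space
--                         if len(currentArg) > 0:
--                             listArgs.append(currentArg)
--                             currentArg = ""
--                 case _:
--                     currentArg = currentArg + char
--     if len(currentArg) > 0:
--         listArgs.append(currentArg)
--     return listArgs
--
-- def interpretArgQuote(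
--     quoteType: str,
--     isBetweenTargetQuoteType: bool,
--     isBetweenOtherQuoteType: bool,
--     currentParam: str,
--     iChar: int,
--     inputParamsString: str,
-- ) -> tuple[str, bool]:
--     """Util function called when a quote is encountered in the arguments."""
--     # Ignore if this is a pair of empty quotes
--     if (iChar < (len(inputParamsString) - 1) and inputParamsString[iChar + 1] == quoteType) or (
--         iChar > 0 and inputParamsString[iChar - 1] == quoteType
--     ):
--         return currentParam, isBetweenTargetQuoteType
--     # Interpret literaly if this is embedded in another quote block or not a pair of quotes
--     if isBetweenOtherQuoteType or (
--         not isBetweenTargetQuoteType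
--         and (iChar == len(inputParamsString) - 1 or quoteType not in inputParamsString[iChar + 1 :])
--     ):
--         currentParam = currentParam + quoteType
--         return currentParam, isBetweenTargetQuoteType
--     # Enter a new quote block
--     isBetweenTargetQuoteType = not isBetweenTargetQuoteType
--     return currentParam, isBetweenTargetQuoteType
-- ===== SOURCE B (Python) =====
-- def parseInputIntoCommand(inputString: str = "") -> list[str]:
--     """Tokenizer as a single pass: suffix quote-occurrence tables are precomputed
--     in one backward sweep, so the quote lookahead is a table lookup instead of a
--     substring scan."""
--     n = len(inputString)
--     # hasS[i] / hasD[i]: does "'" / '"' occur in inputString[i:] ?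
--     hasS = [False] * (n + 1)
--     hasD = [False] * (n + 1)
--     for i in range(n - 1, -1, -1):
--         c = inputString[i]
--         hasS[i] = hasS[i + 1] or c == "'"
--         hasD[i] = hasD[i + 1] or c == '"'
--     args = []
--     cur = []
--     sq = dq = esc = False
--     for i, c in enumerate(inputString):
--         if esc:
--             if dq and c not in '"\\$`':
--                 cur.append('\\')
--             cur.append(c)
--             esc = False
--         elif c == '\\' and not sq:
--             esc = True
--         elif c == "'" or c == '"':
--             if (i + 1 < n and inputString[i + 1] == c) or (i > 0 and inputString[i - 1] == c):
--                 pass  # empty quote pair: drop the quote, state unchanged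
--             else:
--                 target, other = (sq, dq) if c == "'" else (dq, sq)
--                 has_after = (hasS if c == "'" else hasD)[i + 1]
--                 if other or (not target and not has_after):
--                     cur.append(c)
--                 else:
--                     target = not target
--                 if c == "'":
--                     sq = target
--                 else:
--                     dq = target
--         elif c == ' ' and not sq and not dq:
--             if cur:
--                 args.append(''.join(cur))
--                 cur = []
--         else:
--             cur.append(c)
--     if cur:
--         args.append(''.join(cur))
--     return args
-- ===== Notes on version B (the rewrite author's own statement) =====
-- stated objective: alternative
-- what changed: B precomputes two suffix-occurrence tables (is there a ' / " anywhere to the right of position i) in one backward pass, so the per-quote-character substring scan `quoteType in inputString[iChar+1:]` of A is replaced by a table lookup in a single forward pass.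
import Mathlib
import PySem

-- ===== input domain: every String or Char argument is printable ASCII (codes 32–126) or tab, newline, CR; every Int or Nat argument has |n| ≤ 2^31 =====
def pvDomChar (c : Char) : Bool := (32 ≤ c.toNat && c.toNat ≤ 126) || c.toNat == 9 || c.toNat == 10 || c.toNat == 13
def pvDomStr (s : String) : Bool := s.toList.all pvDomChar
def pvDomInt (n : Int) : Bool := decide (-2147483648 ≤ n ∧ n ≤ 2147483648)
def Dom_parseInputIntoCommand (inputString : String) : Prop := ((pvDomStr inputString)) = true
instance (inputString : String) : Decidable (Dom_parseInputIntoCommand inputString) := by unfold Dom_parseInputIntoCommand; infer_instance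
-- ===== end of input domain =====

-- B precomputes suffix quote-occurrence tables in one backward pass, so the quote
-- lookahead of A (a substring scan per quote character) becomes a table lookup.

-- ===== PORT A =====
-- literal port of interpretArgQuote; s[iChar±1] is guarded in range, pyGetD's default is never read
def interpretArgQuote (quoteType : Char) (isBetweenTargetQuoteType isBetweenOtherQuoteType : Bool)
    (currentParam : List Char) (iChar : Int) (inputParamsString : List Char) : List Char × Bool :=
  if (iChar < (inputParamsString.length : Int) - 1 ∧
        PySem.List.pyGetD inputParamsString (iChar + 1) ' ' = quoteType)
     ∨ (iChar > 0 ∧ PySem.List.pyGetD inputParamsString (iChar - 1) ' ' = quoteType) then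
    (currentParam, isBetweenTargetQuoteType)
  -- 'quoteType not in inputString[iChar+1:]' — 1-char substring test, exact as Chars.isIn
  else if isBetweenOtherQuoteType = true
      ∨ (isBetweenTargetQuoteType = false ∧
         (iChar = (inputParamsString.length : Int) - 1 ∨
          PySem.Chars.isIn [quoteType] (PySem.List.slice inputParamsString (some (iChar + 1)) none) = false)) then
    (currentParam ++ [quoteType], isBetweenTargetQuoteType)
  else
    (currentParam, !isBetweenTargetQuoteType)

-- loop body of A; state = (listArgs, currentArg, isBetweenSingleQuotes, isBetweenDoubleQuotes, escapeNextChar)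
def stepA (s : List Char) (st : List (List Char) × List Char × Bool × Bool × Bool)
    (ic : Int × Char) : List (List Char) × List Char × Bool × Bool × Bool :=
  match st, ic with
  | (listArgs, currentArg, sq, dq, esc), (iChar, char) =>
    if esc then
      if dq then
        if char = '"' ∨ char = '\\' ∨ char = '$' ∨ char = '`' then
          (listArgs, currentArg ++ [char], sq, dq, false)
        else (listArgs, currentArg ++ ['\\', char], sq, dq, false)
      else (listArgs, currentArg ++ [char], sq, dq, false)
    else if char = '\\' then
      if sq then (listArgs, currentArg ++ [char], sq, dq, esc)
      else (listArgs, currentArg, sq, dq, true)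
    else if char = '\'' then
      let r := interpretArgQuote char sq dq currentArg iChar s
      (listArgs, r.1, r.2, dq, esc)
    else if char = '"' then
      let r := interpretArgQuote char dq sq currentArg iChar s
      (listArgs, r.1, sq, r.2, esc)
    else if char = ' ' then
      if sq = true ∨ dq = true then (listArgs, currentArg ++ [char], sq, dq, esc)
      else if currentArg.length > 0 then (listArgs ++ [currentArg], [], sq, dq, esc)
      else (listArgs, currentArg, sq, dq, esc)
    else (listArgs, currentArg ++ [char], sq, dq, esc)

def parseInputIntoCommand (inputString : String) : List String :=
  let s := inputString.toList
  let res := (PySem.List.enumerate s 0).foldl (stepA s) ([], [], false, false, false)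
  (if res.2.1.length > 0 then res.1 ++ [res.2.1] else res.1).map (fun l => String.ofList l)

-- ===== PORT B =====
-- Source B's backward fill: (suffixHas q s).getD i = "q occurs in s[i:]"
def suffixHas (q : Char) : List Char → List Bool
  | [] => [false]
  | c :: rest =>
      let t := suffixHas q rest
      (t.getD 0 false || decide (c = q)) :: t

-- loop body of B; same state tuple, but quote handling reads the precomputed tables
def stepB (s : List Char) (n : Nat) (hasS hasD : List Bool)
    (st : List (List Char) × List Char × Bool × Bool × Bool)
    (ic : Int × Char) : List (List Char) × List Char × Bool × Bool × Bool :=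
  match st, ic with
  | (args, cur, sq, dq, esc), (i, c) =>
    if esc then
      (args,
       (if dq = true ∧ ¬(c = '"' ∨ c = '\\' ∨ c = '$' ∨ c = '`') then cur ++ ['\\'] else cur) ++ [c],
       sq, dq, false)
    else if c = '\\' ∧ sq = false then (args, cur, sq, dq, true)
    else if c = '\'' ∨ c = '"' then
      if (i + 1 < (n : Int) ∧ PySem.List.pyGetD s (i + 1) ' ' = c)
         ∨ (i > 0 ∧ PySem.List.pyGetD s (i - 1) ' ' = c) then
        (args, cur, sq, dq, esc)   -- empty quote pair: drop the quote
      else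
        let target := if c = '\'' then sq else dq
        let other := if c = '\'' then dq else sq
        let hasAfter := PySem.List.pyGetD (if c = '\'' then hasS else hasD) (i + 1) false
        if other = true ∨ (target = false ∧ hasAfter = false) then
          (args, cur ++ [c], sq, dq, esc)
        else if c = '\'' then (args, cur, !sq, dq, esc)
        else (args, cur, sq, !dq, esc)
    else if c = ' ' ∧ sq = false ∧ dq = false then
      if cur ≠ [] then (args ++ [cur], [], sq, dq, esc)
      else (args, cur, sq, dq, esc)
    else (args, cur ++ [c], sq, dq, esc)

def parseInputIntoCommand_alt (inputString : String) : List String :=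
  let s := inputString.toList
  let hasS := suffixHas '\'' s
  let hasD := suffixHas '"' s
  let res := (PySem.List.enumerate s 0).foldl (stepB s s.length hasS hasD) ([], [], false, false, false)
  (if res.2.1.length > 0 then res.1 ++ [res.2.1] else res.1).map (fun l => String.ofList l)

-- ===== PRECONDITION & SPEC =====
def Spec_parseInputIntoCommand (inputString : String) (out : List String) : Prop := out = parseInputIntoCommand_alt inputString
instance (inputString : String) (out : List String) : Decidable (Spec_parseInputIntoCommand inputString out) := by unfold Spec_parseInputIntoCommand; infer_instance

-- ===== CLAIM (what is proved, stated in full; the proofs are below) =====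
def Claim_equal_parseInputIntoCommand : Prop := ∀ (inputString : String), Dom_parseInputIntoCommand inputString → Spec_parseInputIntoCommand inputString (parseInputIntoCommand inputString)

-- ===== LEMMAS AND PROOFS =====

theorem suffixHas_getD (q : Char) (s : List Char) (k : Nat) :
    (suffixHas q s).getD k false = decide (q ∈ s.drop k) := by
  induction s generalizing k with
  | nil => cases k <;> simp [suffixHas]
  | cons c rest ih =>
    cases k with
    | zero =>
      have h0 : (suffixHas q rest)[0]?.getD false = decide (q ∈ rest) := by
        simpa using ih 0
      by_cases h1 : q = c <;> by_cases h2 : q ∈ rest <;>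
        simp [suffixHas, h0, h1, h2, List.mem_cons] <;>
          exact fun h => h1 h.symm
    | succ k => simpa [suffixHas] using ih k

theorem singleton_mem_not_isIn (q : Char) (l : List Char) :
    (PySem.Chars.isIn [q] l = false) ↔ ¬ q ∈ l := by
  rw [PySem.Chars.isIn_eq_false_iff]
  constructor
  · intro h hm
    exact h (List.infix_iff_prefix_suffix.mpr (by
      obtain ⟨l1, l2, rfl⟩ := List.append_of_mem hm
      exact ⟨[q] ++ l2, ⟨l2, by simp⟩, ⟨l1, by simp⟩⟩))
  · intro h hinf
    exact h (hinf.mem (by simp))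

theorem step_eq (s : List Char) (st : List (List Char) × List Char × Bool × Bool × Bool)
    (k : Nat) (c : Char) (hk : k < s.length) :
    stepA s st ((k : Int), c) = stepB s s.length (suffixHas '\'' s) (suffixHas '"' s) st ((k : Int), c) := by
  obtain ⟨args, cur, sq, dq, esc⟩ := st
  have hlt : ((k : Int) < (s.length : Int) - 1) ↔ ((k : Int) + 1 < (s.length : Int)) := by omega
  have hsuf : ∀ q : Char,
      (((k : Int) = (s.length : Int) - 1) ∨
        (PySem.Chars.isIn [q] (PySem.List.slice s (some ((k : Int) + 1)) none) = false))
      ↔ (PySem.List.pyGetD (suffixHas q s) ((k : Int) + 1) false = false) := by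
    intro q
    have hc : ((k : Int) + 1) = ((k + 1 : Nat) : Int) := by push_cast; ring
    rw [hc, PySem.List.slice_from_natCast, PySem.List.pyGetD_natCast, suffixHas_getD,
        singleton_mem_not_isIn]
    constructor
    · rintro (h | h)
      · have h1 : k + 1 = s.length := by omega
        simp [h1]
      · simpa using h
    · intro h
      right; simpa using h
  by_cases hesc : esc
  · simp only [stepA, stepB, hesc, if_true]
    by_cases hdq : dq <;> by_cases hin : (c = '"' ∨ c = '\\' ∨ c = '$' ∨ c = '`') <;>
      simp [hdq, hin]
  · by_cases hbs : c = '\\'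
    · by_cases hsq : sq <;> simp [stepA, stepB, hesc, hbs, hsq]
    · by_cases hq1 : c = '\''
      · subst hq1
        simp only [stepA, stepB, interpretArgQuote, hesc, hbs, if_false, if_true, Bool.false_eq_true,
          reduceIte, reduceCtorEq, true_or, false_and, hlt, hsuf '\'']
        split_ifs <;> rfl
      · by_cases hq2 : c = '"'
        · subst hq2
          simp only [stepA, stepB, interpretArgQuote, hesc, hbs, hq1, if_false, if_true,
            Bool.false_eq_true, reduceIte, reduceCtorEq, or_true, false_and, hlt, hsuf '"']
          split_ifs <;> rfl
        · by_cases hsp : c = ' '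
          · subst hsp
            by_cases hsq : sq <;> by_cases hdq : dq <;>
              by_cases hc : cur = [] <;>
                simp [stepA, stepB, hesc, hsq, hdq, hc, List.length_pos_iff]
          · simp [stepA, stepB, hesc, hbs, hq1, hq2, hsp]

theorem fold_eq (s : List Char) :
    (PySem.List.enumerate s 0).foldl (stepA s) ([], [], false, false, false)
      = (PySem.List.enumerate s 0).foldl (stepB s s.length (suffixHas '\'' s) (suffixHas '"' s)) ([], [], false, false, false) := by
  apply PySem.List.foldl_congr_mem
  intro acc x hx
  rw [PySem.List.mem_enumerate_iff] at hx
  obtain ⟨k, hk, rfl⟩ := hx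
  simpa using step_eq s acc k s[k] hk

-- ===== VERDICT (by name: the statement is the Claim_ definition above) =====
theorem parseInputIntoCommand_spec : Claim_equal_parseInputIntoCommand := by
  intro inputString _
  simp only [Spec_parseInputIntoCommand, parseInputIntoCommand, parseInputIntoCommand_alt]
  rw [fold_eq]
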